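-- pv_equiv track=rewrite | github.com/pbstark/SHANGRLA | Code/suite_tools.py | unique_manifest
-- ===== SOURCE A (Python) =====
-- def unique_manifest(parsed_manifest):
--     """
--     Create a single ballot manifest with unique IDs for each ballot.
--     Identifiers are unique across batches, so the ballots can be considered
--     in a canonical order.
--     """
--     second_manifest = {}
--     ballots_counted = 0
--     for batch in parsed_manifest.keys():
--         batch_size = len(parsed_manifest[batch])
--         second_manifest[batch] = list(range(ballots_counted + 1, \
--                                     ballots_counted + batch_size + 1))
--         ballots_counted += batch_size
--     return second_manifest
-- ===== SOURCE B (Python) =====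
-- def unique_manifest(parsed_manifest):
--     """
--     Create a single ballot manifest with unique IDs for each ballot.
--     Back-to-front: first total up all ballots, then walk the batches in
--     reverse order handing out IDs downward from the total, and finally
--     restore the original batch order.
--     """
--     remaining = sum(len(ballots) for ballots in parsed_manifest.values())
--     pairs = []
--     for batch, ballots in reversed(list(parsed_manifest.items())):
--         pairs.append((batch, list(range(remaining - len(ballots) + 1, remaining + 1))))
--         remaining -= len(ballots)
--     return dict(reversed(pairs))
-- ===== Notes on version B (the rewrite author's own statement) =====
-- stated objective: alternative
-- what changed: Instead of A's forward pass threading an upward running counter, B first totals all ballots, then traverses the batches in reverse order assigning ID blocks downward from the total, and reverses the collected pairs to restore the original order.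
import Mathlib
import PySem

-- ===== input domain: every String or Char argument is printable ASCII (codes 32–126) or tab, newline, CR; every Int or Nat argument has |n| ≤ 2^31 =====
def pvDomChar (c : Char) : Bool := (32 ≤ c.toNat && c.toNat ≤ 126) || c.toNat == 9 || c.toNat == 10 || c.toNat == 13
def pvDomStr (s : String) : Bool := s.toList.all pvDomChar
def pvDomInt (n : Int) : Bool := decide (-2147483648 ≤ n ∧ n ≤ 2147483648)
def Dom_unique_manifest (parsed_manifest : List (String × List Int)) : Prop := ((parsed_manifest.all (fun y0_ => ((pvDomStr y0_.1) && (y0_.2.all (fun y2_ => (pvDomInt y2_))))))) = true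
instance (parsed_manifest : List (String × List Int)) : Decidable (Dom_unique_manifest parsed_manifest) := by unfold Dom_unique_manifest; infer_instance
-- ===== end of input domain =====

-- B replaces A's forward pass with an upward running counter by a reverse traversal
-- handing out ID blocks downward from the precomputed total (an "alternative"
-- decomposition, same cost).

-- ===== PORT A =====
-- for batch in parsed_manifest.keys(): second_manifest[batch] = range(...); ballots_counted += len(...)
def unique_manifest (parsed_manifest : List (String × List Int)) : List (String × List Int) :=
  let d := PySem.Dict.mk parsed_manifest
  (d.keys.foldl
    (fun (st : PySem.Dict String (List Int) × Int) batch =>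
      let batch_size : Int := (d.getD batch []).length
      (st.1.insert batch (PySem.List.pyRange (st.2 + 1) (st.2 + batch_size + 1) 1),
       st.2 + batch_size))
    (PySem.Dict.empty, 0)).1.items

-- ===== PORT B =====
-- remaining = sum(len(v)); for batch, ballots in reversed(list(items())): append
-- (batch, range(remaining - len + 1, remaining + 1)); remaining -= len; dict(reversed(pairs))
def unique_manifest_alt (parsed_manifest : List (String × List Int)) : List (String × List Int) :=
  let d := PySem.Dict.mk parsed_manifest
  let remaining : Int := ((d.values.map (fun v => (v.length : Int))).sum)
  let st :=
    (d.items.reverse).foldl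
      (fun (st : List (String × List Int) × Int) p =>
        (st.1 ++ [(p.1, PySem.List.pyRange (st.2 - (p.2.length : Int) + 1) (st.2 + 1) 1)],
         st.2 - (p.2.length : Int)))
      ([], remaining)
  (PySem.Dict.ofList st.1.reverse).items

-- ===== PRECONDITION & SPEC =====
-- Pre_ excludes association lists with duplicate keys: those do not represent a Python
-- dict (A's parameter is a dict, whose keys are unique), so the list→dict encoding is
-- ambiguous there.
def Pre_unique_manifest (parsed_manifest : List (String × List Int)) : Prop :=
  (parsed_manifest.map Prod.fst).Nodup
instance (parsed_manifest : List (String × List Int)) : Decidable (Pre_unique_manifest parsed_manifest) := by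
  unfold Pre_unique_manifest; infer_instance
def pvWitness_unique_manifest : (List (String × List Int)) := [("A", [5, 6]), ("B", []), ("C", [7])]
def Spec_unique_manifest (parsed_manifest : List (String × List Int)) (out : List (String × List Int)) : Prop := out = unique_manifest_alt parsed_manifest
instance (parsed_manifest : List (String × List Int)) (out : List (String × List Int)) : Decidable (Spec_unique_manifest parsed_manifest out) := by unfold Spec_unique_manifest; infer_instance

-- ===== CLAIM (what is proved, stated in full; the proofs are below) =====
def Claim_equal_unique_manifest : Prop := ∀ (parsed_manifest : List (String × List Int)), Dom_unique_manifest parsed_manifest → Pre_unique_manifest parsed_manifest → Spec_unique_manifest parsed_manifest (unique_manifest parsed_manifest)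

-- ===== LEMMAS AND PROOFS =====

-- reference function: both ports equal `ref 0 parsed_manifest`
def ref : Int → List (String × List Int) → List (String × List Int)
  | _, [] => []
  | c, (k, v) :: t =>
      (k, PySem.List.pyRange (c + 1) (c + (v.length : Int) + 1) 1) :: ref (c + (v.length : Int)) t

-- looking a pair's key up in the whole (nodup-keyed) list returns its own value
theorem lookup_self (pm : List (String × List Int)) (h : (pm.map Prod.fst).Nodup)
    (p : String × List Int) (hp : p ∈ pm) :
    (PySem.Dict.mk pm).getD p.1 [] = p.2 := by
  exact PySem.Dict.getD_of_mem_items (d := PySem.Dict.mk pm) hp h []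

-- A's loop, generalized: folding the keys of a suffix `l` onto an accumulator dict
theorem foldA (pm : List (String × List Int)) :
    ∀ (l : List (String × List Int)) (d0 : PySem.Dict String (List Int)) (c : Int),
    (d0.keys ++ l.map Prod.fst).Nodup →
    (∀ p ∈ l, (PySem.Dict.mk pm).getD p.1 [] = p.2) →
    (((l.map Prod.fst).foldl
       (fun (st : PySem.Dict String (List Int) × Int) batch =>
         let batch_size : Int := ((PySem.Dict.mk pm).getD batch []).length
         (st.1.insert batch (PySem.List.pyRange (st.2 + 1) (st.2 + batch_size + 1) 1),
          st.2 + batch_size))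
       (d0, c)).1).items = d0.items ++ ref c l := by
  intro l
  induction l with
  | nil => intro d0 c _ _; simp [ref]
  | cons p t ih =>
      intro d0 c hnd hlk
      obtain ⟨k, v⟩ := p
      have hval : (PySem.Dict.mk pm).getD k [] = v := hlk (k, v) (by simp)
      have hknotin : k ∉ d0.keys := by
        have hdisj := (List.nodup_append.mp hnd).2.2
        exact fun hk => hdisj k hk k (by simp) rfl
      have hcon : d0.contains k = false := by
        rw [PySem.Dict.contains_eq_decide_mem_keys]
        simp [hknotin]
      have hins : (d0.insert k (PySem.List.pyRange (c + 1) (c + (v.length : Int) + 1) 1)).items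
          = d0.items ++ [(k, PySem.List.pyRange (c + 1) (c + (v.length : Int) + 1) 1)] := by
        simp [PySem.Dict.insert, hcon]
      simp only [List.map_cons, List.foldl_cons, hval]
      rw [ih]
      · rw [hins]; simp [ref]
      · have : (d0.insert k (PySem.List.pyRange (c + 1) (c + (v.length : Int) + 1) 1)).keys
            = d0.keys ++ [k] := by
          simp [PySem.Dict.keys, hins]
        rw [this]
        have hperm : (d0.keys ++ [k] ++ t.map Prod.fst).Perm (d0.keys ++ k :: t.map Prod.fst) := by
          simp [List.append_assoc]
        exact hperm.nodup_iff.mpr (by simpa using hnd)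
      · intro q hq; exact hlk q (by simp [hq])

-- A = ref 0
theorem A_eq_ref (pm : List (String × List Int)) (h : (pm.map Prod.fst).Nodup) :
    unique_manifest pm = ref 0 pm := by
  unfold unique_manifest
  have := foldA pm pm PySem.Dict.empty 0
    (by simpa [PySem.Dict.keys, PySem.Dict.empty] using h)
    (fun p hp => lookup_self pm h p hp)
  simpa [PySem.Dict.keys, PySem.Dict.empty] using this

-- total size of a suffix
def tot (l : List (String × List Int)) : Int := (l.map (fun p => ((p.2.length : Int)))).sum

-- B's reverse loop, generalized: it builds (ref c l).reverse and counts down to c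
theorem foldB :
    ∀ (l : List (String × List Int)) (acc : List (String × List Int)) (c : Int),
    (l.reverse.foldl
      (fun (st : List (String × List Int) × Int) p =>
        (st.1 ++ [(p.1, PySem.List.pyRange (st.2 - (p.2.length : Int) + 1) (st.2 + 1) 1)],
         st.2 - (p.2.length : Int)))
      (acc, c + tot l))
    = (acc ++ (ref c l).reverse, c) := by
  intro l
  induction l with
  | nil => intro acc c; simp [ref, tot]
  | cons p t ih =>
      intro acc c
      obtain ⟨k, v⟩ := p
      have htot : c + tot ((k, v) :: t) = (c + (v.length : Int)) + tot t := by
        simp [tot]; ring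
      rw [List.reverse_cons, List.foldl_append, htot, ih acc (c + (v.length : Int))]
      simp only [List.foldl_cons, List.foldl_nil]
      have h1 : c + (v.length : Int) - (v.length : Int) + 1 = c + 1 := by ring
      have h2 : c + (v.length : Int) - (v.length : Int) = c := by ring
      rw [h1, h2]
      simp [ref]

-- a dict built from a nodup-keyed pair list lists exactly those pairs
theorem items_ofList_nodup (l : List (String × List Int)) (h : (l.map Prod.fst).Nodup) :
    (PySem.Dict.ofList l).items = l := by
  unfold PySem.Dict.ofList PySem.Dict.update
  rw [PySem.Dict.items_foldl_insert_fresh l Prod.fst Prod.snd PySem.Dict.empty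
      (fun a _ => PySem.Dict.contains_empty _) h]
  simp [PySem.Dict.empty]

-- ref keeps the keys
theorem ref_keys : ∀ (c : Int) (l : List (String × List Int)),
    (ref c l).map Prod.fst = l.map Prod.fst := by
  intro c l
  induction l generalizing c with
  | nil => simp [ref]
  | cons p t ih => obtain ⟨k, v⟩ := p; simp [ref, ih]

-- B = ref 0
theorem B_eq_ref (pm : List (String × List Int)) (h : (pm.map Prod.fst).Nodup) :
    unique_manifest_alt pm = ref 0 pm := by
  unfold unique_manifest_alt
  have hitems : (PySem.Dict.mk pm).items = pm := rfl
  have hvals : (PySem.Dict.mk pm).values = pm.map Prod.snd := rfl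
  have hsum : ((PySem.Dict.mk pm).values.map (fun v => ((v.length : Int)))).sum = 0 + tot pm := by
    rw [hvals, List.map_map]; simp only [zero_add, tot, Function.comp_def]
  simp only [hsum]
  rw [foldB pm [] 0]
  simp only [List.nil_append, List.reverse_reverse]
  exact items_ofList_nodup (ref 0 pm) (by rw [ref_keys]; exact h)

-- ===== VERDICT (by name: the statement is the Claim_ definition above) =====
theorem unique_manifest_spec : Claim_equal_unique_manifest := by
  intro pm _ hpre
  unfold Spec_unique_manifest
  rw [A_eq_ref pm hpre, B_eq_ref pm hpre]
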